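-- pv_equiv track=rewrite | github.com/me1iissa/AstryxOS | scripts/syscall-diff.py | maybe_strip_enoent_prefix
-- ===== SOURCE A (Python) =====
-- from typing import Dict, List, Optional, Tuple
--
-- _PROBE_NAMES = {"openat", "newfstatat", "access", "stat", "fstat"}
--
-- def maybe_strip_enoent_prefix(native: List[Dict]) -> Tuple[List[Dict], int]:
--     """Trim leading native-only noise that AstryxOS skips by construction.
--
--     Two distinct kinds of leading entries are dropped:
--
--     1. The initial ``execve(...)`` strace logs as the first event of the
--        traced process — AstryxOS does not surface execve through
--        ``[LINUX-SYS]`` because the tracer is enabled after the kernel jumps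
--        into the new ELF entry point.  Drop one execve at most.
--     2. Any subsequent ``openat/newfstatat/access/stat/fstat`` that returns
--        ``ENOENT`` until we hit the first non-ENOENT call.  These reflect the
--        dynamic linker probing host-only directories (``/tmp/...`` from
--        ``LD_LIBRARY_PATH``, ``glibc-hwcaps/x86-64-v4`` etc.) that simply do
--        not exist on AstryxOS.
--     """
--     out: List[Dict] = []
--     dropped = 0
--     saw_execve = False
--     in_prefix = True
--     for c in native:
--         if in_prefix and not saw_execve and c["name"] == "execve":
--             saw_execve = True
--             dropped += 1
--             continue
--         if in_prefix and c["name"] in _PROBE_NAMES and c["errno"] == "ENOENT":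
--             dropped += 1
--             continue
--         in_prefix = False
--         out.append(c)
--     return out, dropped
-- ===== SOURCE B (Python) =====
-- _PROBE_NAMES = {"openat", "newfstatat", "access", "stat", "fstat"}
--
--
-- def maybe_strip_enoent_prefix(native):
--     """Find the length i of the droppable prefix, then slice: return native[i:], i."""
--     i = 0
--     saw_execve = False
--     while i < len(native):
--         c = native[i]
--         if not saw_execve and c["name"] == "execve":
--             saw_execve = True
--         elif not (c["name"] in _PROBE_NAMES and c["errno"] == "ENOENT"):
--             break
--         i += 1
--     return native[i:], i
-- ===== Notes on version B (the rewrite author's own statement) =====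
-- stated objective: simpler
-- what changed: Instead of folding over the whole list with an in_prefix flag while appending every kept entry to a new output list, B only scans for the boundary index i of the droppable prefix and returns the slice native[i:] with i, never touching entries after the boundary.
import Mathlib
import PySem

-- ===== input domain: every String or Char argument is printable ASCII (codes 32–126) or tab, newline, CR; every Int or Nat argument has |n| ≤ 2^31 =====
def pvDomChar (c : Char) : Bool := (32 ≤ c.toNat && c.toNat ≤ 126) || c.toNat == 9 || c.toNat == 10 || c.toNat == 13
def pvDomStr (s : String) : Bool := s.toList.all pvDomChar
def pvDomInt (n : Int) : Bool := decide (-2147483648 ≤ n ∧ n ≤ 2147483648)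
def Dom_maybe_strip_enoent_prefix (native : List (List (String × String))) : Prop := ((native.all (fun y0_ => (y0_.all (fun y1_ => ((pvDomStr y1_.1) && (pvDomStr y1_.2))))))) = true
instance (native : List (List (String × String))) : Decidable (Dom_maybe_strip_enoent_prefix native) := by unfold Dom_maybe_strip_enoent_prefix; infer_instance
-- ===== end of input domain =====

-- ===== PORT A =====
-- B changes the decomposition: A folds over the whole list appending kept entries; B only finds the
-- prefix boundary and slices. Equal on Pre_ (entries carry the keys A reads); proved below.
-- Probe syscall names (the Python set _PROBE_NAMES; membership test only, so a list of the distinct names).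
def pvProbes : List String := ["openat", "newfstatat", "access", "stat", "fstat"]

-- c[k]: Python raises KeyError when the key is missing; PySem.Dict.get? returns none there.
-- Pre_ guarantees the key is present wherever a port reads it, so the total form getD "" is exact
-- under Pre_ ("" is never "execve", "ENOENT" nor a probe name).
def pvGet (c : List (String × String)) (k : String) : String :=
  (PySem.Dict.mk c).getD k ""

-- one iteration of A's for-loop; state = (out, dropped, saw_execve, in_prefix)
def pvAStep (st : (List (List (String × String))) × Int × Bool × Bool)
    (c : List (String × String)) : (List (List (String × String))) × Int × Bool × Bool :=
  let (out, dropped, saw, inp) := st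
  if inp && !saw && (pvGet c "name" == "execve") then
    (out, dropped + 1, true, inp)
  else if inp && pvProbes.contains (pvGet c "name") && (pvGet c "errno" == "ENOENT") then
    (out, dropped + 1, saw, inp)
  else
    (out ++ [c], dropped, saw, false)

def maybe_strip_enoent_prefix (native : List (List (String × String))) : (List (List (String × String))) × Int :=
  let r := native.foldl pvAStep ([], 0, false, true)
  (r.1, r.2.1)

-- ===== PORT B =====
-- B's while-loop: walk forward while the entry is droppable; at the break point the remaining list
-- IS the slice native[i:] and i is the count consumed.
def pvBLoop (native : List (List (String × String))) (saw : Bool) (i : Int) :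
    (List (List (String × String))) × Int :=
  match native with
  | [] => ([], i)
  | c :: rest =>
    if !saw && (pvGet c "name" == "execve") then pvBLoop rest true (i + 1)
    else if pvProbes.contains (pvGet c "name") && (pvGet c "errno" == "ENOENT") then
      pvBLoop rest saw (i + 1)
    else (c :: rest, i)

def maybe_strip_enoent_prefix_alt (native : List (List (String × String))) : (List (List (String × String))) × Int :=
  pvBLoop native false 0

-- ===== PRECONDITION & SPEC =====
-- Python A raises KeyError when an entry it inspects lacks "name" (or lacks "errno" while its
-- name is a probe name); A inspects entry j only while every earlier entry was dropped, so Pre_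
-- demands well-formed keys at j only when all entries before j are droppable. (It is marginally
-- narrower than A's raise set only on traces with two droppable leading execves followed by a
-- malformed entry, which A stops before reading; see the cite in claim.json.)
def pvKeysOK (c : List (String × String)) : Bool :=
  ((PySem.Dict.mk c).get? "name").isSome &&
    (!(pvProbes.contains (pvGet c "name")) || ((PySem.Dict.mk c).get? "errno").isSome)

def pvDroppable (c : List (String × String)) : Bool :=
  ((PySem.Dict.mk c).get? "name" == some "execve") ||
    (pvProbes.contains (pvGet c "name") && ((PySem.Dict.mk c).get? "errno" == some "ENOENT"))

def Pre_maybe_strip_enoent_prefix (native : List (List (String × String))) : Prop :=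
  ∀ j < native.length, (native.take j).all pvDroppable = true → pvKeysOK (native.getD j []) = true
instance (native : List (List (String × String))) : Decidable (Pre_maybe_strip_enoent_prefix native) := by
  unfold Pre_maybe_strip_enoent_prefix; infer_instance

def pvWitness_maybe_strip_enoent_prefix : (List (List (String × String))) :=
  [[("name", "execve")], [("name", "openat"), ("errno", "ENOENT")], [("name", "close")]]

def Spec_maybe_strip_enoent_prefix (native : List (List (String × String))) (out : (List (List (String × String))) × Int) : Prop := out = maybe_strip_enoent_prefix_alt native
instance (native : List (List (String × String))) (out : (List (List (String × String))) × Int) : Decidable (Spec_maybe_strip_enoent_prefix native out) := by unfold Spec_maybe_strip_enoent_prefix; infer_instance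

-- ===== CLAIM (what is proved, stated in full; the proofs are below) =====
def Claim_equal_maybe_strip_enoent_prefix : Prop := ∀ (native : List (List (String × String))), Dom_maybe_strip_enoent_prefix native → Pre_maybe_strip_enoent_prefix native → Spec_maybe_strip_enoent_prefix native (maybe_strip_enoent_prefix native)

-- ===== LEMMAS AND PROOFS =====

-- Once in_prefix is false, A's fold only appends every remaining entry.
theorem pvA_after_prefix (l : List (List (String × String)))
    (out : List (List (String × String))) (d : Int) (s : Bool) :
    l.foldl pvAStep (out, d, s, false) = (out ++ l, d, s, false) := by
  induction l generalizing out with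
  | nil => simp
  | cons c rest ih =>
    simp only [List.foldl_cons, pvAStep, Bool.false_and]
    simpa using ih (out ++ [c])

-- While in the prefix, A's fold and B's loop walk in lock-step (same state saw/dropped).
theorem pvAB_loop (l : List (List (String × String))) (s : Bool) (d : Int) :
    ((l.foldl pvAStep ([], d, s, true)).1, (l.foldl pvAStep ([], d, s, true)).2.1)
      = pvBLoop l s d := by
  induction l generalizing s d with
  | nil => simp [pvBLoop]
  | cons c rest ih =>
    by_cases h1 : (!s && (pvGet c "name" == "execve")) = true
    · simp [pvAStep, pvBLoop, h1, ih true (d + 1)]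
    · by_cases h2 : (pvProbes.contains (pvGet c "name") && (pvGet c "errno" == "ENOENT")) = true
      · have hm : pvGet c "name" ∈ pvProbes ∧ pvGet c "errno" = "ENOENT" := by simpa using h2
        simp [pvAStep, pvBLoop, h1, hm, ih s (d + 1)]
      · have hm : ¬(pvGet c "name" ∈ pvProbes ∧ pvGet c "errno" = "ENOENT") := by simpa using h2
        simp [pvAStep, pvBLoop, h1, hm, pvA_after_prefix]

-- ===== VERDICT (by name: the statement is the Claim_ definition above) =====
theorem maybe_strip_enoent_prefix_spec : Claim_equal_maybe_strip_enoent_prefix := by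
  intro native _ _
  unfold Spec_maybe_strip_enoent_prefix maybe_strip_enoent_prefix maybe_strip_enoent_prefix_alt
  exact pvAB_loop native false 0
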